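-- pv_equiv track=rewrite | github.com/Lightning-AI/litdata | src/litdata/utilities/shuffle.py | _get_shared_chunks
-- ===== SOURCE A (Python) =====
-- from typing import Any, Dict, List, Tuple
--
-- def _get_shared_chunks(workers_chunks: List[List[int]]) -> Dict[int, List[int]]:
--     """Returns a dictionary mapping a chunk index to a list of workers that share that same chunk."""
--     shared_chunks = {}
--     for worker, chunks in enumerate(workers_chunks):
--         for chunk in chunks:
--             if chunk not in shared_chunks:
--                 shared_chunks[chunk] = [worker]
--             else:
--                 shared_chunks[chunk].append(worker)
--     # Remove chunk indexes that are only read by a single worker (and thus not shared)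
--     return {chunk: workers for chunk, workers in shared_chunks.items() if len(workers) > 1}
-- ===== SOURCE B (Python) =====
-- from typing import Dict, List
--
--
-- def _get_shared_chunks(workers_chunks: List[List[int]]) -> Dict[int, List[int]]:
--     # Chunk-major strategy: no incremental chunk->workers map is maintained at all.
--     # For each distinct chunk (first-occurrence order), rescan the workers and
--     # collect every worker occurrence; keep the chunk only if it occurs > 1 time.
--     flat = [chunk for chunks in workers_chunks for chunk in chunks]
--     shared = {}
--     for chunk in dict.fromkeys(flat):
--         workers = [w for w, chunks in enumerate(workers_chunks) for c in chunks if c == chunk]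
--         if len(workers) > 1:
--             shared[chunk] = workers
--     return shared
-- ===== Notes on version B (the rewrite author's own statement) =====
-- stated objective: alternative
-- what changed: Replaces A's worker-major single pass that incrementally grows a chunk->workers dict and then filters it by list length with a chunk-major scheme: no map is built while scanning; for each distinct chunk (in first-occurrence order) the whole input is rescanned to collect its worker occurrences, and the chunk is emitted only if it occurs more than once.
import Mathlib
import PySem

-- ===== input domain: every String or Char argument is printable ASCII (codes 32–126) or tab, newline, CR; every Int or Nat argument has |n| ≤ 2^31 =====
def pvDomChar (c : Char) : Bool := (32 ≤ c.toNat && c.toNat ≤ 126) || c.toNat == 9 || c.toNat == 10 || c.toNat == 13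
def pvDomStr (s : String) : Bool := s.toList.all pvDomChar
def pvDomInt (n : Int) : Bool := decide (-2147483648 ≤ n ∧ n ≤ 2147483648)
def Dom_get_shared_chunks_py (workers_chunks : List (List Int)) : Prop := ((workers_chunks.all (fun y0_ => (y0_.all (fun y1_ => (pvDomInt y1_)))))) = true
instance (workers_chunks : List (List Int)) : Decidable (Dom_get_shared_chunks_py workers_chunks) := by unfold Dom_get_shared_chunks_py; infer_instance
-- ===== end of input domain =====

-- B replaces A's worker-major map-building pass with a chunk-major rescan: for each distinct
-- chunk it rescans the input for its worker occurrences (alternative decomposition, not faster).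


-- ===== PORT A =====
def get_shared_chunks_py (workers_chunks : List (List Int)) : List (Int × List Int) :=
  (PySem.Dict.ofList
    (((PySem.List.enumerate workers_chunks 0).foldl
        (fun d wc => wc.2.foldl
          (fun d chunk =>
            if d.contains chunk = false then d.insert chunk [wc.1]
            else d.modify chunk [] (fun ws => ws ++ [wc.1])) d)
        PySem.Dict.empty).items.filter (fun p => decide (1 < p.2.length)))).items

-- ===== PORT B =====
def get_shared_chunks_py_alt (workers_chunks : List (List Int)) : List (Int × List Int) :=
  ((PySem.List.dedup (workers_chunks.flatMap (fun chunks => chunks))).foldl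
      (fun d chunk =>
        let workers := (PySem.List.enumerate workers_chunks 0).flatMap
            (fun wc => (wc.2.filter (fun c => c == chunk)).map (fun _ => wc.1))
        if 1 < workers.length then d.insert chunk workers else d)
      PySem.Dict.empty).items

-- ===== PRECONDITION & SPEC =====
def Spec_get_shared_chunks_py (workers_chunks : List (List Int)) (out : List (Int × List Int)) : Prop := out = get_shared_chunks_py_alt workers_chunks
instance (workers_chunks : List (List Int)) (out : List (Int × List Int)) : Decidable (Spec_get_shared_chunks_py workers_chunks out) := by unfold Spec_get_shared_chunks_py; infer_instance

-- ===== CLAIM (what is proved, stated in full; the proofs are below) =====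
def Claim_equal_get_shared_chunks_py : Prop := ∀ (workers_chunks : List (List Int)), Dom_get_shared_chunks_py workers_chunks → Spec_get_shared_chunks_py workers_chunks (get_shared_chunks_py workers_chunks)

-- ===== LEMMAS AND PROOFS =====

-- One occurrence of a chunk: append the worker to the chunk's list (insert-or-append as one modify).
def pvStep (d : PySem.Dict Int (List Int)) (p : Int × Int) : PySem.Dict Int (List Int) :=
  d.modify p.1 [] (fun ws => ws ++ [p.2])

-- All (chunk, worker) occurrence pairs, flattened in traversal order.
def pvPairs (ws : List (List Int)) : List (Int × Int) :=
  (PySem.List.enumerate ws 0).flatMap (fun wc => wc.2.map (fun c => (c, wc.1)))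

-- The worker list accumulated for chunk c.
def pvVal (ws : List (List Int)) (c : Int) : List Int :=
  ((pvPairs ws).filter (fun p => p.1 == c)).map (fun p => p.2)

-- "chunk c is shared" as a Bool predicate.
def pvQ (ws : List (List Int)) (c : Int) : Bool := decide ((1 : Int) < (ws.flatten.count c : Int))

theorem pvStep_eq (d : PySem.Dict Int (List Int)) (c w : Int) :
    (if d.contains c = false then d.insert c [w]
     else d.modify c [] (fun ws => ws ++ [w])) = pvStep d (c, w) := by
  by_cases h : d.contains c = true
  · simp [h, pvStep]
  · simp only [Bool.not_eq_true] at h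
    simp [h, pvStep, PySem.Dict.modify, PySem.Dict.getD_of_not_contains d ([] : List Int) h]

theorem pvFoldl_nested {σ α β γ : Type} (g : σ → γ → σ) (h : α → List β) (k : α → β → γ) :
    ∀ (l : List α) (s : σ),
      l.foldl (fun s a => (h a).foldl (fun s b => g s (k a b)) s) s
        = (l.flatMap (fun a => (h a).map (k a))).foldl g s := by
  intro l
  induction l with
  | nil => intro s; simp
  | cons a l ih => intro s; simp [List.flatMap_cons, List.foldl_append, List.foldl_map, ih]

theorem pvPairs_fst (ws : List (List Int)) : (pvPairs ws).map Prod.fst = ws.flatten := by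
  rw [pvPairs, List.map_flatMap]
  have h : (fun (wc : Int × List Int) => (wc.2.map (fun c => (c, wc.1))).map Prod.fst)
      = (fun wc => wc.2) := by
    funext wc
    rw [List.map_map]
    exact List.map_id _
  rw [h, List.flatMap_def, PySem.List.map_snd_enumerate]

-- A's dict as a flat fold.
theorem pvA_dict (ws : List (List Int)) :
    (PySem.List.enumerate ws 0).foldl
      (fun d wc => wc.2.foldl
        (fun d chunk =>
          if d.contains chunk = false then d.insert chunk [wc.1]
          else d.modify chunk [] (fun ws => ws ++ [wc.1])) d)
      PySem.Dict.empty
    = (pvPairs ws).foldl pvStep PySem.Dict.empty := by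
  simp only [pvStep_eq]
  exact pvFoldl_nested pvStep Prod.snd (fun wc c => (c, wc.1)) (PySem.List.enumerate ws 0) _

theorem pvKeys_A (ws : List (List Int)) :
    ((pvPairs ws).foldl pvStep PySem.Dict.empty).keys = PySem.Set.ofList ws.flatten := by
  have h := PySem.Dict.keys_foldl_modify_key (pvPairs ws) Prod.fst []
      (fun _ p ws => ws ++ [p.2]) PySem.Dict.empty
  simpa [pvStep, PySem.Set.update_nil_left, pvPairs_fst] using h

theorem pvNodup_A (ws : List (List Int)) :
    ((pvPairs ws).foldl pvStep PySem.Dict.empty).keys.Nodup := by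
  have h := PySem.Dict.nodup_keys_foldl_modify_key (pvPairs ws) Prod.fst []
      (fun _ p ws => ws ++ [p.2]) PySem.Dict.empty (by simp)
  simpa [pvStep] using h

theorem pvGetD_A (ws : List (List Int)) (c : Int) :
    ((pvPairs ws).foldl pvStep PySem.Dict.empty).getD c [] = pvVal ws c := by
  have h := PySem.Dict.getD_foldl_modify_append (pvPairs ws) PySem.Dict.empty c
  simpa [pvStep, pvVal] using h

theorem pvVal_len (ws : List (List Int)) (c : Int) :
    (pvVal ws c).length = ws.flatten.count c := by
  calc (pvVal ws c).length = ((pvPairs ws).filter (fun p => p.1 == c)).length := by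
        simp [pvVal]
    _ = (pvPairs ws).countP (fun p => p.1 == c) := List.countP_eq_length_filter.symm
    _ = ((pvPairs ws).map Prod.fst).countP (fun x => x == c) := by
        rw [List.countP_map]; rfl
    _ = ws.flatten.count c := by rw [pvPairs_fst]; rfl

theorem pvQ_eq_len (ws : List (List Int)) :
    (fun k => decide (1 < (pvVal ws k).length)) = pvQ ws := by
  funext k
  rw [pvQ, ← pvVal_len]
  simp

-- B's rescanned worker list for a chunk is exactly the value A accumulates for it.
theorem pvWorkers_eq (ws : List (List Int)) (k : Int) :
    (PySem.List.enumerate ws 0).flatMap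
        (fun wc => (wc.2.filter (fun c => c == k)).map (fun _ => wc.1))
      = pvVal ws k := by
  rw [pvVal, pvPairs]
  rw [List.filter_flatMap, List.map_flatMap]
  apply List.flatMap_congr
  intro wc _
  rw [List.filter_map, List.map_map]
  rfl

theorem pvItems_ofList (l : List (Int × List Int)) (h : (l.map Prod.fst).Nodup) :
    (PySem.Dict.ofList l).items = l := by
  have := PySem.Dict.items_foldl_insert_fresh l Prod.fst Prod.snd PySem.Dict.empty
      (fun a _ => by simp) h
  simpa [PySem.Dict.ofList, PySem.Dict.update] using this

-- ===== VERDICT (by name: the statement is the Claim_ definition above) =====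
theorem get_shared_chunks_py_spec : Claim_equal_get_shared_chunks_py := by
  intro ws _
  unfold Spec_get_shared_chunks_py get_shared_chunks_py get_shared_chunks_py_alt
  rw [pvA_dict]
  -- A side: filtered items of the full dict
  rw [PySem.Dict.items_eq_map_keys _ (pvNodup_A ws) [], pvKeys_A]
  have hgetA : (fun k => (k, ((pvPairs ws).foldl pvStep PySem.Dict.empty).getD k []))
      = (fun k => (k, pvVal ws k)) := by
    funext k; rw [pvGetD_A]
  rw [hgetA, List.filter_map]
  have hcomp : ((fun (p : Int × List Int) => decide (1 < p.2.length)) ∘ fun k => (k, pvVal ws k))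
      = pvQ ws := by
    rw [← pvQ_eq_len]; rfl
  rw [hcomp, pvItems_ofList]
  · -- B side: conditional inserts over the dedup list = plain inserts over its filtered part
    simp only [pvWorkers_eq, ← pvQ_eq_len]
    have hif : (fun (d : PySem.Dict Int (List Int)) (chunk : Int) =>
        if 1 < (pvVal ws chunk).length then d.insert chunk (pvVal ws chunk) else d)
        = (fun d chunk => if (fun k => decide (1 < (pvVal ws k).length)) chunk = true
            then d.insert chunk (pvVal ws chunk) else d) := by
      funext d c; simp
    rw [hif, ← List.foldl_filter]
    have hnd : ((((PySem.List.dedup (ws.flatMap (fun chunks => chunks))).filter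
        (fun k => decide (1 < (pvVal ws k).length))).map (fun (k : Int) => k)).Nodup) := by
      simp only [List.map_id']
      exact ((PySem.List.nodup_dedup _).filter _)
    have h := PySem.Dict.items_foldl_insert_fresh
        ((PySem.List.dedup (ws.flatMap (fun chunks => chunks))).filter
          (fun k => decide (1 < (pvVal ws k).length)))
        (fun k => k) (fun k => pvVal ws k) PySem.Dict.empty (fun a _ => by simp) hnd
    rw [h]
    simp [pvQ_eq_len, List.flatMap_id']
    rfl
  · rw [List.map_map]
    have : (Prod.fst ∘ fun k => (k, pvVal ws k)) = id := rfl
    rw [this, List.map_id]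
    exact ((PySem.Set.nodup_ofList ws.flatten).filter _)
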